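-- pv_equiv track=rewrite | github.com/LozesMelero/M2_Plathyrrhiniens_ISEM_2025 | Analysis/Phylogeny/MrBayes/TED/Reduced_morpho_matrix/MorphoCutter.py | parse_morpho_seq
-- ===== SOURCE A (Python) =====
-- def parse_morpho_seq(morpho_seq):
--     char_indices = [] # will store the index of the character each state encoded in the sequence belongs to
--     current_char = 0
--     i = 0
--
--     while i < len(morpho_seq):
--         if morpho_seq[i] in '({':
--             # set the closing statement according to the string element handeled
--             closing = ')' if morpho_seq[i] == '(' else '}'
--             start = i + 1
--             end = morpho_seq.find(closing, start) # returns the index of the first occurrence of the closing statement starting from the opening one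
--
--             # Assign current_char to each state inside the parentheses/brackets + those of the parentheses/brackets
--             num_states = end - start + 2
--             char_indices.extend([current_char] * num_states)
--
--             # Skip past the closing bracket
--             i = end + 1
--             current_char += 1
--         else:
--             # Single state character
--             char_indices.append(current_char)
--             i += 1
--             current_char += 1
--
--     return char_indices
-- ===== SOURCE B (Python) =====
-- def parse_morpho_seq(morpho_seq):
--     char_indices = []
--     current_char = 0
--     closer = None  # expected closing symbol while inside a bracket group
--     for ch in morpho_seq:
--         if closer is not None:
--             char_indices.append(current_char)
--             if ch == closer:
--                 closer = None
--                 current_char += 1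
--         elif ch in '({':
--             closer = ')' if ch == '(' else '}'
--             char_indices.append(current_char)
--         else:
--             char_indices.append(current_char)
--             current_char += 1
--     return char_indices
-- ===== Notes on version B (the rewrite author's own statement) =====
-- stated objective: idiomatic
-- what changed: Replaced A's while loop with str.find jumps and end-start+2 replication arithmetic by a flat single-pass state machine that carries the expected closing symbol and emits one index per character; Pre_ excludes strings with an unclosed '(' or '{' group, on which A's find returns -1 and its loop never terminates (A returns no value there).
-- outside the precondition, e.g. on parse_morpho_seq('('): A does not finish within the time limit, B returns [0]; on parse_morpho_seq('{'): A does not finish within the time limit, B returns [0]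
import Mathlib
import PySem

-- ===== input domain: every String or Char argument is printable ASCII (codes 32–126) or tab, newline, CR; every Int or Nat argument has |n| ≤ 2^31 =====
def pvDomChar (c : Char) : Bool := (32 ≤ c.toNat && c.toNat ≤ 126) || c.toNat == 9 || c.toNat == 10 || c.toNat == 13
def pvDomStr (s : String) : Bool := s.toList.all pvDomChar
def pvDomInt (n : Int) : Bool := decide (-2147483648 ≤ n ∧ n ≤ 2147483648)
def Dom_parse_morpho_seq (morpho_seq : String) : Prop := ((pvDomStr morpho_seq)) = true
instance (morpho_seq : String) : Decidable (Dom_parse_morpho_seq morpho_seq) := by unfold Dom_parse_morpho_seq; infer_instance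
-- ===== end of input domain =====

-- B replaces A's find-and-jump while loop by a flat one-pass state machine (objective: idiomatic).

-- ===== PORT A =====
-- exact port of str.find(c, start) restricted to the suffix: index of first occurrence of
-- the single character c in l (A only ever searches for one character, from start = i+1)
def pvFind (c : Char) : List Char → Option Nat
  | [] => none
  | a :: l => if a = c then some 0 else (pvFind c l).map (· + 1)

-- A's while loop. fuel = remaining allowed iterations; i strictly increases each step,
-- so fuel = length is enough whenever A terminates. pvFind = none is Python find = -1,
-- on which A loops forever (excluded by Pre_); the port stops there.
def pvAloop (l : List Char) : Nat → Nat → Int → List Int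
  | 0, _, _ => []
  | fuel + 1, i, cur =>
    match l[i]? with
    | none => []
    | some ch =>
      if ch = '(' ∨ ch = '{' then
        let closing := if ch = '(' then ')' else '}'
        match pvFind closing (l.drop (i + 1)) with
        | none => []  -- Python: end = -1, A never terminates; outside Pre_
        | some k =>
          -- end = i+1+k, num_states = end - start + 2 = k + 2, next i = end + 1
          List.replicate (k + 2) cur ++ pvAloop l fuel (i + 1 + k + 1) (cur + 1)
      else cur :: pvAloop l fuel (i + 1) (cur + 1)

def parse_morpho_seq (morpho_seq : String) : List Int :=
  pvAloop morpho_seq.toList morpho_seq.toList.length 0 0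

-- ===== PORT B =====
-- state machine: the state is the expected closing symbol (none = outside a bracket group)
def pvBloop : List Char → Option Char → Int → List Int
  | [], _, _ => []
  | c :: rest, some closer, cur =>
    if c = closer then cur :: pvBloop rest none (cur + 1)
    else cur :: pvBloop rest (some closer) cur
  | c :: rest, none, cur =>
    if c = '(' then cur :: pvBloop rest (some ')') cur
    else if c = '{' then cur :: pvBloop rest (some '}') cur
    else cur :: pvBloop rest none (cur + 1)

def parse_morpho_seq_alt (morpho_seq : String) : List Int :=
  pvBloop morpho_seq.toList none 0

-- ===== PRECONDITION & SPEC =====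
-- well-formedness flag: every bracket group that gets opened is closed later
def pvWF : List Char → Option Char → Bool
  | [], st => st.isNone
  | c :: rest, some closer => pvWF rest (if c = closer then none else some closer)
  | c :: rest, none =>
    pvWF rest (if c = '(' then some (')' : Char) else if c = '{' then some ('}' : Char) else none)

-- Pre_ excludes exactly the inputs on which A never terminates (an opening '(' or '{' whose
-- group is never closed makes A's find return -1 and its loop run forever); A returns a value
-- precisely on the well-formed strings admitted here.
def Pre_parse_morpho_seq (morpho_seq : String) : Prop := pvWF morpho_seq.toList none = true
instance (morpho_seq : String) : Decidable (Pre_parse_morpho_seq morpho_seq) := by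
  unfold Pre_parse_morpho_seq; infer_instance

def pvWitness_parse_morpho_seq : String := "A(01)C"

def Spec_parse_morpho_seq (morpho_seq : String) (out : List Int) : Prop := out = parse_morpho_seq_alt morpho_seq
instance (morpho_seq : String) (out : List Int) : Decidable (Spec_parse_morpho_seq morpho_seq out) := by unfold Spec_parse_morpho_seq; infer_instance

-- ===== CLAIM (what is proved, stated in full; the proofs are below) =====
def Claim_equal_parse_morpho_seq : Prop := ∀ (morpho_seq : String), Dom_parse_morpho_seq morpho_seq → Pre_parse_morpho_seq morpho_seq → Spec_parse_morpho_seq morpho_seq (parse_morpho_seq morpho_seq)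

-- ===== LEMMAS AND PROOFS =====

-- inside a group B emits cur for each char up to and including the first closer, then resumes
lemma pvBloop_inside (closer : Char) :
    ∀ (m : List Char) (cur : Int), pvWF m (some closer) = true →
      ∃ k, pvFind closer m = some k ∧
        pvBloop m (some closer) cur =
          List.replicate (k + 1) cur ++ pvBloop (m.drop (k + 1)) none (cur + 1) ∧
        pvWF (m.drop (k + 1)) none = true := by
  intro m
  induction m with
  | nil => intro cur h; simp [pvWF] at h
  | cons c rest ih =>
    intro cur h
    by_cases hc : c = closer
    · refine ⟨0, ?_, ?_, ?_⟩ <;> simp [pvFind, pvBloop, hc, pvWF] <;>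
        simpa [pvWF, hc] using h
    · have h' : pvWF rest (some closer) = true := by simpa [pvWF, hc] using h
      obtain ⟨k, hf, hb, hw⟩ := ih cur h'
      exact ⟨k + 1, by simp [pvFind, hc, hf], by simp [pvBloop, hc, hb, List.replicate_succ], by simpa using hw⟩

lemma main_lemma (l : List Char) :
    ∀ (fuel i : Nat) (cur : Int), l.length - i ≤ fuel → pvWF (l.drop i) none = true →
      pvAloop l fuel i cur = pvBloop (l.drop i) none cur := by
  intro fuel
  induction fuel with
  | zero =>
    intro i cur hf _
    have : l.drop i = [] := List.drop_eq_nil_of_le (by omega)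
    simp [pvAloop, this, pvBloop]
  | succ fuel ih =>
    intro i cur hf hw
    match hget : l[i]? with
    | none =>
      have : l.length ≤ i := by
        by_contra hlt
        simp [List.getElem?_eq_getElem (by omega : i < l.length)] at hget
      have : l.drop i = [] := List.drop_eq_nil_of_le this
      simp [pvAloop, hget, this, pvBloop]
    | some ch =>
      have hi : i < l.length := by
        by_contra hge
        simp [List.getElem?_eq_none_iff.mpr (by omega : l.length ≤ i)] at hget
      have hdrop : l.drop i = ch :: l.drop (i + 1) := by
        rw [List.drop_eq_getElem_cons hi]
        simp [List.getElem?_eq_getElem hi] at hget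
        simp [hget]
      by_cases hop : ch = '(' ∨ ch = '{'
      · -- opener
        have hclos : ∀ closing, (if ch = '(' then (')' : Char) else '}') = closing →
            pvWF (l.drop (i + 1)) (some closing) = true →
            pvAloop l (fuel + 1) i cur = pvBloop (l.drop i) none cur := by
          intro closing hceq hw'
          obtain ⟨k, hfind, hb, hwrest⟩ := pvBloop_inside closing (l.drop (i+1)) cur hw'
          have hdd : (l.drop (i+1)).drop (k+1) = l.drop (i + 1 + k + 1) := by
            rw [List.drop_drop]; ring_nf
          have hrec : pvAloop l fuel (i + 1 + k + 1) (cur + 1) =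
              pvBloop (l.drop (i + 1 + k + 1)) none (cur + 1) := by
            apply ih _ _ (by omega)
            rw [← hdd]; exact hwrest
          rcases hop with h1 | h1
          · subst h1
            have : closing = ')' := by simpa using hceq.symm
            subst this
            simp only [pvAloop, hget, if_pos (Or.inl rfl)]
            simp only [hdrop, pvBloop, if_pos rfl]
            simp [hfind, hb, hrec, hdd, List.replicate_succ]
          · subst h1
            have hne : ('{' : Char) ≠ '(' := by decide
            have : closing = '}' := by simpa [hne] using hceq.symm
            subst this
            simp only [pvAloop, hget, if_pos (Or.inr rfl)]
            simp only [hdrop, pvBloop, if_neg hne, if_pos rfl]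
            simp [hne, hfind, hb, hrec, hdd, List.replicate_succ]
        rcases hop with h1 | h1
        · apply hclos ')' (by simp [h1])
          have := hw; rw [hdrop] at this
          simpa [pvWF, h1] using this
        · have hne : ch ≠ '(' := by subst h1; decide
          apply hclos '}' (by simp [hne, h1])
          have := hw; rw [hdrop] at this
          simpa [pvWF, h1, hne] using this
      · -- ordinary character
        push_neg at hop
        have hw' : pvWF (l.drop (i + 1)) none = true := by
          have := hw; rw [hdrop] at this
          simpa [pvWF, hop.1, hop.2] using this
        have hrec := ih (i + 1) (cur + 1) (by omega) hw'
        simp [pvAloop, hget, hop.1, hop.2, hdrop, pvBloop, hrec]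

-- ===== VERDICT (by name: the statement is the Claim_ definition above) =====
theorem parse_morpho_seq_spec : Claim_equal_parse_morpho_seq := by
  intro s _ hpre
  unfold Spec_parse_morpho_seq parse_morpho_seq parse_morpho_seq_alt
  have := main_lemma s.toList s.toList.length 0 0 (by omega) (by simpa using hpre)
  simpa using this
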